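-- pv_equiv track=rewrite | github.com/Kacpron123/AdventOfCode | day04/solve.py | diagonals_right
-- ===== SOURCE A (Python) =====
-- def diagonals_right(matrix):
--     row=len(matrix)
--     col=len(matrix[0])
--     diagonals=[]
--     for start in range(col):
--         x,y=start,0
--         diagonal=[]
--         while x<col and y<row:
--             diagonal.append(matrix[y][x])
--             x+=1
--             y+=1
--         diagonals.append(''.join(diagonal))
--     for start in range(col)[1:]:
--         diagonal=[]
--         x,y=0,start
--         while x<col and y<row:
--             diagonal.append(matrix[y][x])
--             x+=1
--             y+=1
--         diagonals.append(''.join(diagonal))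
--     return diagonals
-- ===== SOURCE B (Python) =====
-- def diagonals_right(matrix):
--     col = len(matrix[0])
--     buckets = {}
--     for y, r in enumerate(matrix):
--         for x in range(col):
--             buckets.setdefault(x - y, []).append(r[x])
--     order = list(range(col)) + [-d for d in range(1, col)]
--     return [''.join(buckets.get(k, [])) for k in order]
-- ===== Notes on version B (the rewrite author's own statement) =====
-- stated objective: alternative
-- what changed: replaces A's per-diagonal re-scans of the matrix (one walking x,y loop per output diagonal) with a single pass over all cells that groups characters into dict buckets keyed by the offset x-y, then assembles the diagonals by ordered bucket lookup
-- outside the precondition, e.g. on diagonals_right(['ab', 'cd', 'ef', 'gh', 'i']): A returns ['ad', 'b', 'cf'], B raises IndexError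
import Mathlib
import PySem

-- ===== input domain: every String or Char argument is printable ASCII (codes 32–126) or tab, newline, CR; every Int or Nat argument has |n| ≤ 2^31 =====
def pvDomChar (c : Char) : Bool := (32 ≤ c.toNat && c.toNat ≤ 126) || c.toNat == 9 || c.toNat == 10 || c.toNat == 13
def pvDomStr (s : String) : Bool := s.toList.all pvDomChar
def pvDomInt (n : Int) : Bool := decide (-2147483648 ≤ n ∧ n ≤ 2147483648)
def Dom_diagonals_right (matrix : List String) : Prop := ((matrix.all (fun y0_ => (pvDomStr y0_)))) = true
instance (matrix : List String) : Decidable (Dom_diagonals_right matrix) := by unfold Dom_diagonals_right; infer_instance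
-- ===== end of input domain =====

-- B replaces A's per-diagonal re-scans with one pass over all cells bucketing characters by offset x-y in a dict, then ordered bucket lookup (alternative decomposition; equivalence of return values proved on Pre_).


-- ===== PORT A =====
-- matrix[y][x]; indices here are always nonnegative and, on Pre_, in range, so the ' ' defaults are never read on Pre_
def charAt (m : List String) (y x : Nat) : Char := ((m.getD y "").toList).getD x ' '

-- the 'while x<col and y<row: diagonal.append(matrix[y][x]); x+=1; y+=1' loop
def diagCollect (m : List String) (col row x y : Nat) : List Char :=
  if x < col ∧ y < row then charAt m y x :: diagCollect m col row (x + 1) (y + 1) else []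
  termination_by col - x
  decreasing_by omega

def diagonals_right (matrix : List String) : List String :=
  let row := matrix.length
  let col := (matrix.headD "").toList.length
  let diagonals := (List.range col).foldl
    (fun acc start => acc ++ [String.ofList (diagCollect matrix col row start 0)]) []
  ((List.range col).drop 1).foldl
    (fun acc start => acc ++ [String.ofList (diagCollect matrix col row 0 start)]) diagonals

-- ===== PORT B =====
def diagonals_right_alt (matrix : List String) : List String :=
  let col := (matrix.headD "").toList.length
  let buckets : PySem.Dict Int (List Char) :=
    (PySem.List.enumerate matrix).foldl
      (fun d p => (List.range col).foldl
        (fun d x => d.modify (((x : Nat) : Int) - p.1) [] (fun v => v ++ [p.2.toList.getD x ' '])) d)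
      PySem.Dict.empty
  let order : List Int :=
    (List.range col).map (fun i => ((i : Nat) : Int)) ++ (PySem.List.pyRange 1 (col : Int)).map (fun d => -d)
  order.map (fun k => String.ofList (buckets.getD k []))

-- ===== PRECONDITION & SPEC =====
-- Pre_ excludes the empty matrix and matrices with a row shorter than the first row: on almost all of
-- those Python A raises IndexError; on the few ragged matrices whose short rows lie beyond every scanned
-- diagonal A still returns, but B's single pass reads every row up to col and raises there, so they are excluded too.
def Pre_diagonals_right (matrix : List String) : Prop :=
  matrix ≠ [] ∧ ∀ s ∈ matrix, (matrix.headD "").toList.length ≤ s.toList.length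
instance (matrix : List String) : Decidable (Pre_diagonals_right matrix) := by
  unfold Pre_diagonals_right; infer_instance

def pvWitness_diagonals_right : List String := ["abc", "def"]

def Spec_diagonals_right (matrix : List String) (out : List String) : Prop := out = diagonals_right_alt matrix
instance (matrix : List String) (out : List String) : Decidable (Spec_diagonals_right matrix out) := by unfold Spec_diagonals_right; infer_instance

-- ===== CLAIM (what is proved, stated in full; the proofs are below) =====
def Claim_equal_diagonals_right : Prop := ∀ (matrix : List String), Dom_diagonals_right matrix → Pre_diagonals_right matrix → Spec_diagonals_right matrix (diagonals_right matrix)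

-- ===== LEMMAS AND PROOFS =====

-- the per-row pair (key, char) list B's inner loop feeds into the dict
def rowPairs (i : Int) (r : List Char) (col : Nat) : List (Int × Char) :=
  (List.range col).map (fun x => (((x : Nat) : Int) - i, r.getD x ' '))

lemma inner_eq_rowPairs (col : Nat) (i : Int) (r : List Char) (d : PySem.Dict Int (List Char)) :
    (List.range col).foldl (fun d x => d.modify (((x : Nat) : Int) - i) [] (fun v => v ++ [r.getD x ' '])) d
      = (rowPairs i r col).foldl (fun d p => d.modify p.1 [] (fun v => v ++ [p.2])) d := by
  simp [rowPairs, List.foldl_map]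

lemma foldl_nested_flatMap {α : Type} (l : List α) (g : α → List (Int × Char))
    (d : PySem.Dict Int (List Char)) :
    l.foldl (fun d a => (g a).foldl (fun d p => d.modify p.1 [] (fun v => v ++ [p.2])) d) d
      = (l.flatMap g).foldl (fun d p => d.modify p.1 [] (fun v => v ++ [p.2])) d := by
  induction l generalizing d with
  | nil => simp
  | cons a l ih => simp [List.foldl_append, ih]

lemma filter_range_int (n : Nat) (c : Int) :
    (List.range n).filter (fun x => decide (((x : Nat) : Int) = c))
      = if 0 ≤ c ∧ c < (n : Int) then [c.toNat] else [] := by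
  induction n with
  | zero => simp
  | succ n ih =>
    rw [List.range_succ, List.filter_append, ih]
    simp only [List.filter_cons, List.filter_nil]
    push_cast
    split_ifs <;> simp_all <;> omega

lemma rowPick (i : Int) (r : List Char) (col : Nat) (k : Int) :
    (List.map (fun p => p.2) (List.filter (fun p => p.1 == k) (rowPairs i r col)))
      = if 0 ≤ k + i ∧ k + i < (col : Int) then [r.getD (k + i).toNat ' '] else [] := by
  rw [rowPairs, List.filter_map, List.map_map]
  have hp : ((fun p : Int × Char => p.1 == k) ∘ fun x : Nat => (((x : Nat) : Int) - i, r.getD x ' '))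
      = fun x : Nat => decide (((x : Nat) : Int) = k + i) := by
    funext x
    rw [Bool.eq_iff_iff]
    simp only [Function.comp, beq_iff_eq, decide_eq_true_eq]
    omega
  rw [hp, filter_range_int]
  split_ifs <;> simp

lemma enumerate_eq_map (m : List String) (s : Int) :
    PySem.List.enumerate m s = (List.range m.length).map (fun y => (s + ((y : Nat) : Int), m.getD y "")) := by
  induction m generalizing s with
  | nil => simp [PySem.List.enumerate]
  | cons a m ih =>
    rw [PySem.List.enumerate, ih, List.length_cons, List.range_succ_eq_map, List.map_cons, List.map_map]
    simp [Function.comp]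
    intro y _
    ring

-- the content of bucket k after B's double loop
lemma bucket_eq (m : List String) (col : Nat) (k : Int) :
    (((PySem.List.enumerate m).foldl
      (fun d p => (List.range col).foldl
        (fun d x => d.modify (((x : Nat) : Int) - p.1) [] (fun v => v ++ [p.2.toList.getD x ' '])) d)
      PySem.Dict.empty).getD k [])
      = (List.range m.length).flatMap
          (fun y => if 0 ≤ k + ((y : Nat) : Int) ∧ k + ((y : Nat) : Int) < (col : Int)
                    then [charAt m y (k + ((y : Nat) : Int)).toNat] else []) := by
  rw [enumerate_eq_map, List.foldl_map]
  simp only [inner_eq_rowPairs]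
  rw [foldl_nested_flatMap, PySem.Dict.getD_foldl_modify_append, PySem.Dict.getD_empty,
    List.filter_flatMap, List.map_flatMap, List.nil_append]
  apply List.flatMap_congr
  intro y _
  rw [rowPick]
  simp [charAt]

lemma flatMap_window {α : Type} (n s t : Nat) (f : Nat → α) :
    (List.range n).flatMap (fun y => if s ≤ y ∧ y < s + t then [f y] else [])
      = (List.range (min t (n - s))).map (fun j => f (s + j)) := by
  induction n with
  | zero => simp
  | succ n ih =>
    rw [List.range_succ, List.flatMap_append, ih]
    by_cases h1 : s ≤ n ∧ n < s + t
    · have e1 : min t (n + 1 - s) = min t (n - s) + 1 := by omega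
      have e2 : min t (n - s) = n - s := by omega
      rw [e1, List.range_succ, List.map_append]
      simp [h1, e2]
    · have e1 : min t (n + 1 - s) = min t (n - s) := by omega
      simp [h1, e1]

lemma diagCollect_eq (m : List String) (col row x y : Nat) :
    diagCollect m col row x y
      = (List.range (min (col - x) (row - y))).map (fun j => charAt m (y + j) (x + j)) := by
  induction x, y using diagCollect.induct (col := col) (row := row) with
  | case1 x y h ih =>
    rw [diagCollect]
    have e : min (col - x) (row - y) = min (col - (x+1)) (row - (y+1)) + 1 := by omega
    rw [if_pos h, ih, e, List.range_succ_eq_map, List.map_cons, List.map_map]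
    simp only [Nat.add_zero]
    congr 1
    apply List.map_congr_left
    intro j _
    simp only [Function.comp]
    congr 1 <;> omega
  | case2 x y h =>
    rw [diagCollect]
    have e : min (col - x) (row - y) = 0 := by omega
    rw [if_neg h, e]
    simp

lemma bucket_nonneg (m : List String) (col start : Nat) (h : start < col) :
    (((PySem.List.enumerate m).foldl
      (fun d p => (List.range col).foldl
        (fun d x => d.modify (((x : Nat) : Int) - p.1) [] (fun v => v ++ [p.2.toList.getD x ' '])) d)
      PySem.Dict.empty).getD ((start : Nat) : Int) [])
      = diagCollect m col m.length start 0 := by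
  rw [bucket_eq, diagCollect_eq]
  have hfun : (fun y : Nat => if 0 ≤ ((start : Nat) : Int) + ((y : Nat) : Int) ∧ ((start : Nat) : Int) + ((y : Nat) : Int) < (col : Int)
                    then [charAt m y (((start : Nat) : Int) + ((y : Nat) : Int)).toNat] else [])
      = (fun y : Nat => if 0 ≤ y ∧ y < 0 + (col - start) then [charAt m y (start + y)] else []) := by
    funext y
    by_cases hy : y < col - start
    · rw [if_pos (by omega), if_pos (by omega)]
      have e2 : (((start : Nat) : Int) + ((y : Nat) : Int)).toNat = start + y := by omega
      rw [e2]
    · rw [if_neg (by omega), if_neg (by omega)]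
  rw [hfun, flatMap_window]
  simp

lemma bucket_neg (m : List String) (col s : Nat) :
    (((PySem.List.enumerate m).foldl
      (fun d p => (List.range col).foldl
        (fun d x => d.modify (((x : Nat) : Int) - p.1) [] (fun v => v ++ [p.2.toList.getD x ' '])) d)
      PySem.Dict.empty).getD (-((s : Nat) : Int)) [])
      = diagCollect m col m.length 0 s := by
  rw [bucket_eq, diagCollect_eq]
  have hfun : (fun y : Nat => if 0 ≤ -((s : Nat) : Int) + ((y : Nat) : Int) ∧ -((s : Nat) : Int) + ((y : Nat) : Int) < (col : Int)
                    then [charAt m y (-((s : Nat) : Int) + ((y : Nat) : Int)).toNat] else [])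
      = (fun y : Nat => if s ≤ y ∧ y < s + col then [charAt m y (y - s)] else []) := by
    funext y
    by_cases hy : s ≤ y ∧ y < s + col
    · have c1 : 0 ≤ -((s : Nat) : Int) + ((y : Nat) : Int) ∧ -((s : Nat) : Int) + ((y : Nat) : Int) < (col : Int) := by
        omega
      rw [if_pos c1, if_pos hy]
      have e2 : (-((s : Nat) : Int) + ((y : Nat) : Int)).toNat = y - s := by omega
      rw [e2]
    · have c1 : ¬ (0 ≤ -((s : Nat) : Int) + ((y : Nat) : Int) ∧ -((s : Nat) : Int) + ((y : Nat) : Int) < (col : Int)) := by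
        omega
      rw [if_neg c1, if_neg hy]
  rw [hfun, flatMap_window]
  apply List.map_congr_left
  intro j _
  have e2 : s + j - s = 0 + j := by omega
  rw [e2]

lemma pyRange_one_eq (col : Nat) :
    PySem.List.pyRange 1 (col : Int) = ((List.range col).drop 1).map (fun n => ((n : Nat) : Int)) := by
  rw [PySem.List.pyRange_of_pos 1 (col : Int) Int.one_pos]
  match col with
  | 0 => simp
  | 1 => simp
  | (n + 2) =>
    rw [if_pos (by push_cast; omega)]
    have e : ((((n + 2 : Nat) : Int) - 1 + 1 - 1) / 1).toNat = n + 1 := by push_cast; omega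
    rw [e, show List.range (n + 2) = 0 :: List.map Nat.succ (List.range (n + 1)) from List.range_succ_eq_map]
    simp only [List.drop_succ_cons, List.drop_zero, List.map_map]
    apply List.map_congr_left
    intro y _
    simp only [Function.comp]
    push_cast
    ring

-- ===== VERDICT (by name: the statement is the Claim_ definition above) =====
theorem diagonals_right_spec : Claim_equal_diagonals_right := by
  intro matrix _ _
  unfold Spec_diagonals_right diagonals_right diagonals_right_alt
  simp only []
  rw [PySem.List.foldl_append_singleton_eq_map, PySem.List.foldl_append_singleton_eq_map,
    List.nil_append, List.map_append, pyRange_one_eq, List.map_map, List.map_map, List.map_map]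
  congr 1
  · apply List.map_congr_left
    intro start hs
    rw [List.mem_range] at hs
    simp only [Function.comp]
    rw [bucket_nonneg matrix _ start hs]
  · apply List.map_congr_left
    intro s _
    simp only [Function.comp]
    rw [bucket_neg matrix _ s]
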